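-- pv_equiv track=rewrite | github.com/Rajivrocks-Ltd/AutoML | Assignment2/Plotter.py | decode_parameters
-- ===== SOURCE A (Python) =====
-- def decode_parameters(save_name):
--
--     param_dict = {}
--
--     save_name = save_name.split("\\")[-1]
--     for param_string in save_name.split("-"):
--
--         param_name = ""
--         param_value = ""
--
--         value_start = False
--         for i in range(len(param_string)):
--             char = param_string[i]
--
--             if char.isnumeric() or char == 'F' or (i+1 < len(param_string) and char == 'T' and param_string[i+1] =='r'):
--                 value_start = True
--             if value_start:
--                 param_value += char
--             else:
--                 param_name += char
--
--         param_dict[param_name] = param_value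
--
--     return param_dict
-- ===== SOURCE B (Python) =====
-- def _split_param(p):
--     i = next((j for j, c in enumerate(p)
--               if c.isnumeric() or c == 'F' or (c == 'T' and p[j+1:j+2] == 'r')),
--              len(p))
--     return p[:i], p[i:]
--
--
-- def decode_parameters(save_name):
--     tail = save_name.split("\\")[-1]
--     return dict(_split_param(p) for p in tail.split("-"))
-- ===== Notes on version B (the rewrite author's own statement) =====
-- stated objective: simpler
-- what changed: Instead of one loop accumulating two growing name/value buffers per parameter under a sticky flag and inserting into a dict imperatively, B finds the first value-start index per parameter (a single find-first scan), produces name/value as two slices, and builds the whole result as dict() of a mapped pair sequence.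
import Mathlib
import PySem

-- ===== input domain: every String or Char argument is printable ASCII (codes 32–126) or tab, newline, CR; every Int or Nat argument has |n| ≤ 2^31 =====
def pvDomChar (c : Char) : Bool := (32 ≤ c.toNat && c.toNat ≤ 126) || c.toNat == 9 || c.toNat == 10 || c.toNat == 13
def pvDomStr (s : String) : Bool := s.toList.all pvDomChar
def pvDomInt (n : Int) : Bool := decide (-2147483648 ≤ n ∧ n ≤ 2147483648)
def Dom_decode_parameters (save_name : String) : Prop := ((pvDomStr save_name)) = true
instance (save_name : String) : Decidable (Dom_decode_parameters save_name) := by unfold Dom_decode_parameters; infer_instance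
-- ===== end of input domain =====

-- B replaces A's imperative loop (two growing name/value buffers under a sticky flag,
-- inserted into a dict one by one) with: find-first value-start index, two slices,
-- dict() of a mapped pair list (objective: simpler). Return-value equivalence only.

-- ===== PORT A =====
-- char.isnumeric() is ported as PySem.Chars.isdigit: exact on the printable-ASCII domain,
-- where the only numeric characters are '0'..'9'.
-- A's inner index loop, transliterated as structural recursion over the same characters:
-- `char = param_string[i]` is the head, `param_string[i+1]` (guarded by i+1 < len) is `rest.head?`.
def pvInnerA : List Char → List Char → List Char → Bool → List Char × List Char
  | [], param_name, param_value, _ => (param_name, param_value)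
  | c :: rest, param_name, param_value, value_start =>
    let value_start' := if PySem.Chars.isdigit c || c == 'F' || (c == 'T' && rest.head? == some 'r')
                        then true else value_start
    if value_start' then pvInnerA rest param_name (param_value ++ [c]) value_start'
    else pvInnerA rest (param_name ++ [c]) param_value value_start'

def decode_parameters (save_name : String) : List (String × String) :=
  -- save_name.split("\\")[-1]; str.split never returns an empty list, so [-1] never raises
  let save_name' := (PySem.List.pyGet? (PySem.Chars.splitOn save_name.toList ['\\']) (-1)).getD []
  let param_dict := (PySem.Chars.splitOn save_name' ['-']).foldl
    (fun (d : PySem.Dict (List Char) (List Char)) param_string =>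
      let nv := pvInnerA param_string [] [] false
      d.insert nv.1 nv.2)
    PySem.Dict.empty
  param_dict.items.map (fun p => (String.ofList p.1, String.ofList p.2))

-- ===== PORT B =====
-- Source B's next((j for j, c in enumerate(p) if …), len(p)): a find-first recursion carrying
-- the current index j; the lookahead p[j+1:j+2] == 'r' is the slice on the WHOLE string p.
def pvFindStart (p : List Char) : Nat → List Char → Option Nat
  | _, [] => none
  | j, c :: rest =>
    if PySem.Chars.isdigit c || c == 'F' ||
       (c == 'T' && PySem.List.slice p (some ((j : Int) + 1)) (some ((j : Int) + 2)) == ['r'])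
    then some j else pvFindStart p (j + 1) rest

-- Source B's _split_param: name/value are the two slices p[:i], p[i:] at the found index.
def pvSplitParam (p : List Char) : List Char × List Char :=
  let i := (pvFindStart p 0 p).getD p.length
  (PySem.List.slice p none (some (i : Int)), PySem.List.slice p (some (i : Int)) none)

def decode_parameters_alt (save_name : String) : List (String × String) :=
  let tail := (PySem.List.pyGet? (PySem.Chars.splitOn save_name.toList ['\\']) (-1)).getD []
  let pairs := (PySem.Chars.splitOn tail ['-']).map pvSplitParam
  (PySem.Dict.ofList pairs).items.map (fun p => (String.ofList p.1, String.ofList p.2))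

-- ===== PRECONDITION & SPEC =====
def Spec_decode_parameters (save_name : String) (out : List (String × String)) : Prop := out = decode_parameters_alt save_name
instance (save_name : String) (out : List (String × String)) : Decidable (Spec_decode_parameters save_name out) := by unfold Spec_decode_parameters; infer_instance

-- ===== CLAIM (what is proved, stated in full; the proofs are below) =====
def Claim_equal_decode_parameters : Prop := ∀ (save_name : String), Dom_decode_parameters save_name → Spec_decode_parameters save_name (decode_parameters save_name)

-- ===== LEMMAS AND PROOFS =====

-- proof-side boundary function: first value-start position, length if none
def pvBnd : List Char → Nat
  | [] => 0
  | c :: rest => if PySem.Chars.isdigit c || c == 'F' || (c == 'T' && rest.head? == some 'r')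
                 then 0 else 1 + pvBnd rest

lemma pvBnd_le (cs : List Char) : pvBnd cs ≤ cs.length := by
  induction cs with
  | nil => simp [pvBnd]
  | cons c rest ih =>
    by_cases h : (PySem.Chars.isdigit c || c == 'F' || (c == 'T' && rest.head? == some 'r')) = true
    · simp [pvBnd, h]
    · simp [pvBnd, h]
      omega

lemma pvInnerA_true (cs : List Char) : ∀ n v, pvInnerA cs n v true = (n, v ++ cs) := by
  induction cs with
  | nil => simp [pvInnerA]
  | cons c rest ih => intro n v; simp [pvInnerA, ih, List.append_assoc]

lemma pvInnerA_false (cs : List Char) : ∀ n v,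
    pvInnerA cs n v false = (n ++ cs.take (pvBnd cs), v ++ cs.drop (pvBnd cs)) := by
  induction cs with
  | nil => simp [pvInnerA, pvBnd]
  | cons c rest ih =>
    intro n v
    by_cases h : (PySem.Chars.isdigit c || c == 'F' || (c == 'T' && rest.head? == some 'r')) = true
    · simp [pvInnerA, pvBnd, h, pvInnerA_true, List.append_assoc]
    · simp [pvInnerA, pvBnd, h, ih, List.append_assoc, List.take_succ_cons, List.drop_succ_cons,
            Nat.add_comm 1 (pvBnd rest)]

lemma pvFindStart_eq (p : List Char) : ∀ rest j, p.drop j = rest →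
    pvFindStart p j rest = if pvBnd rest = rest.length then none else some (j + pvBnd rest) := by
  intro rest
  induction rest with
  | nil => intro j _; simp [pvFindStart, pvBnd]
  | cons c rest' ih =>
    intro j hdrop
    have hdrop' : p.drop (j + 1) = rest' := by
      have := congrArg (List.drop 1) hdrop
      simpa [List.drop_drop, Nat.add_comm] using this
    have hsl : PySem.List.slice p (some ((j : Int) + 1)) (some ((j : Int) + 2)) = rest'.take 1 := by
      have h1 : ((j : Int) + 1) = ((j + 1 : Nat) : Int) := by push_cast; ring
      have h2 : ((j : Int) + 2) = ((j + 2 : Nat) : Int) := by push_cast; ring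
      rw [h1, h2, PySem.List.slice_natCast, hdrop']
      congr 1
      omega
    have hlook : (PySem.List.slice p (some ((j : Int) + 1)) (some ((j : Int) + 2)) == ['r'])
        = (rest'.head? == some 'r') := by
      rw [hsl]; cases rest' <;> simp
    by_cases h : (PySem.Chars.isdigit c || c == 'F' || (c == 'T' && rest'.head? == some 'r')) = true
    · simp [pvFindStart, pvBnd, hlook, h]
    · have hb := pvBnd_le rest'
      simp only [pvFindStart, pvBnd, hlook, h]
      rw [ih (j + 1) hdrop']
      by_cases he : pvBnd rest' = rest'.length
      · simp [he]
        omega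
      · simp [he]
        constructor
        · omega
        · omega

lemma pvSplitParam_eq (p : List Char) : pvInnerA p [] [] false = pvSplitParam p := by
  have hfind := pvFindStart_eq p p 0 (by simp)
  have hi : (pvFindStart p 0 p).getD p.length = pvBnd p := by
    rw [hfind]
    by_cases he : pvBnd p = p.length <;> simp [he]
  rw [pvInnerA_false]
  simp [pvSplitParam, hi, PySem.List.slice_to_natCast, PySem.List.slice_from_natCast]

theorem decode_parameters_spec : Claim_equal_decode_parameters := by
  intro save_name _
  unfold Spec_decode_parameters decode_parameters decode_parameters_alt
  simp only [PySem.Dict.ofList, PySem.Dict.update, List.foldl_map]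
  have hf : (fun (d : PySem.Dict (List Char) (List Char)) (param_string : List Char) =>
      let nv := pvInnerA param_string [] [] false
      d.insert nv.1 nv.2)
      = (fun (d : PySem.Dict (List Char) (List Char)) ps =>
      d.insert (pvSplitParam ps).1 (pvSplitParam ps).2) := by
    funext d ps
    simp [← pvSplitParam_eq]
  rw [hf]
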